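-- pv_equiv track=rewrite | github.com/dongdongx2x2/TIL | algorithm_solve/Programmers/lv3/move_block/sol.py | solution
-- ===== SOURCE A (Python) =====
-- from collections import deque
--
-- def get_next_pos(pos, board):
--     next_pos = []
--     pos1, pos2 = pos
--     pos1_x, pos1_y = pos1
--     pos2_x, pos2_y = pos2
--
--     # 4가지 이동 가능(상, 하, 좌, 우)
--     moves = [(-1, 0), (1, 0), (0, -1), (0, 1)]
--     for move in moves:
--         next_pos1 = (pos1_x + move[0], pos1_y + move[1])
--         next_pos2 = (pos2_x + move[0], pos2_y + move[1])
--         if board[next_pos1[0]][next_pos1[1]] == 0 and board[next_pos2[0]][next_pos2[1]] == 0: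
--             next_pos.append((next_pos1, next_pos2))
--
--     # 회전 가능 여부 확인
--     if pos1_x == pos2_x: # 로봇이 가로로 놓여 있는 경우
--         for i in [-1, 1]: # 위로 회전, 아래로 회전
--             if board[pos1_x + i][pos1_y] == 0 and board[pos2_x + i][pos2_y] == 0:
--                 next_pos.append(((pos1_x + i, pos1_y), pos1))
--                 next_pos.append(((pos2_x + i, pos2_y), pos2))
--     elif pos1_y == pos2_y: # 로봇이 세로로 놓여 있는 경우
--         for i in [-1, 1]: # 왼쪽으로 회전, 오른쪽으로 회전
--             if board[pos1_x][pos1_y + i] == 0 and board[pos2_x][pos2_y + i] == 0: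
--                 next_pos.append((pos1, (pos1_x, pos1_y + i)))
--                 next_pos.append((pos2, (pos2_x, pos2_y + i)))
--
--     return next_pos
--
-- def solution(board):
--     n = len(board)
--     # 맵 외곽에 벽 추가 (경계 처리를 위함)
--     new_board = [[1] * (n + 2) for _ in range(n + 2)]
--     for i in range(n):
--         for j in range(n):
--             new_board[i + 1][j + 1] = board[i][j]
--
--     # BFS 수행
--     q = deque([(((1, 1), (1, 2)), 0)]) # 위치, 시간
--     visited = set([((1, 1), (1, 2))]) # 방문 처리
--
--     while q:
--         pos, time = q.popleft()
--         # (n, n) 위치에 도달하면 종료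
--         if (n, n) in pos:
--             return time
--         # 현재 위치에서 이동할 수 있는 위치 확인
--         for next_pos in get_next_pos(pos, new_board):
--             if next_pos not in visited:
--                 q.append((next_pos, time + 1))
--                 visited.add(next_pos)
--
--     return 0
-- ===== SOURCE B (Python) =====
-- def get_next_pos(pos, board):
--     next_pos = []
--     pos1, pos2 = pos
--     pos1_x, pos1_y = pos1
--     pos2_x, pos2_y = pos2
--     moves = [(-1, 0), (1, 0), (0, -1), (0, 1)]
--     for move in moves:
--         next_pos1 = (pos1_x + move[0], pos1_y + move[1])
--         next_pos2 = (pos2_x + move[0], pos2_y + move[1])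
--         if board[next_pos1[0]][next_pos1[1]] == 0 and board[next_pos2[0]][next_pos2[1]] == 0:
--             next_pos.append((next_pos1, next_pos2))
--     if pos1_x == pos2_x:
--         for i in [-1, 1]:
--             if board[pos1_x + i][pos1_y] == 0 and board[pos2_x + i][pos2_y] == 0:
--                 next_pos.append(((pos1_x + i, pos1_y), pos1))
--                 next_pos.append(((pos2_x + i, pos2_y), pos2))
--     elif pos1_y == pos2_y:
--         for i in [-1, 1]:
--             if board[pos1_x][pos1_y + i] == 0 and board[pos2_x][pos2_y + i] == 0:
--                 next_pos.append((pos1, (pos1_x, pos1_y + i)))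
--                 next_pos.append((pos2, (pos2_x, pos2_y + i)))
--     return next_pos
--
--
-- def solution(board):
--     n = len(board)
--     new_board = [[1] * (n + 2) for _ in range(n + 2)]
--     for i in range(n):
--         for j in range(n):
--             new_board[i + 1][j + 1] = board[i][j]
--
--     # level-order BFS: the time is the depth of the current frontier
--     frontier = [((1, 1), (1, 2))]
--     visited = set(frontier)
--     time = 0
--     while frontier:
--         if any((n, n) in pos for pos in frontier):
--             return time
--         next_frontier = []
--         for pos in frontier:
--             for nxt in get_next_pos(pos, new_board):
--                 if nxt not in visited:
--                     next_frontier.append(nxt)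
--                     visited.add(nxt)
--         frontier = next_frontier
--         time += 1
--     return 0
-- ===== Notes on version B (the rewrite author's own statement) =====
-- stated objective: alternative
-- what changed: Replaces the (state,time) deque BFS that stores a time per queued node with a level-order BFS over whole frontiers, deriving the answer from the loop depth instead of per-node bookkeeping (get_next_pos kept).
import Mathlib
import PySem

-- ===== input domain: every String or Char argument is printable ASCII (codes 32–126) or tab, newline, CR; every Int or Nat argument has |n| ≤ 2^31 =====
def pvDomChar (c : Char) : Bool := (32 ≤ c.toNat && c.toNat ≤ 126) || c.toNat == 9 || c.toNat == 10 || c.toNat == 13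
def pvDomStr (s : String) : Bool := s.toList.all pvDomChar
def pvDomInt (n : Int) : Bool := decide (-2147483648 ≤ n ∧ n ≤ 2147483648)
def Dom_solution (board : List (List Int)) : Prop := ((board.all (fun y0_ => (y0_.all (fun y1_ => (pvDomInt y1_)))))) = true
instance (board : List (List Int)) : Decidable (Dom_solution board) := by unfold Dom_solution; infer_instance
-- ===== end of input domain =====

-- B replaces A's (state,time) deque BFS by a level-order BFS whose answer is the loop depth; same shared
-- neighbour helper, same return value (objective: alternative decomposition, no speed claim).

abbrev PvPos := Int × Int
abbrev PvSt := PvPos × PvPos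

-- ===== PORT A =====

-- board[x][y]: total form with default 1; under Pre_solution every access A performs is in range
def pvCell (b : List (List Int)) (x y : Int) : Int :=
  (PySem.List.pyGet? ((PySem.List.pyGet? b x).getD []) y).getD 1

-- shared helper get_next_pos (identical source in Source A and Source B)
def getNextPos (pos : PvSt) (board : List (List Int)) : List PvSt :=
  let pos1 := pos.1
  let pos2 := pos.2
  let moves : List PvPos := [(-1,0),(1,0),(0,-1),(0,1)]
  let np := moves.foldl (fun acc m =>
      if pvCell board (pos1.1 + m.1) (pos1.2 + m.2) == 0 &&
         pvCell board (pos2.1 + m.1) (pos2.2 + m.2) == 0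
      then acc ++ [((pos1.1 + m.1, pos1.2 + m.2), (pos2.1 + m.1, pos2.2 + m.2))] else acc) []
  if pos1.1 == pos2.1 then
    ([-1, 1] : List Int).foldl (fun acc i =>
      if pvCell board (pos1.1 + i) pos1.2 == 0 && pvCell board (pos2.1 + i) pos2.2 == 0
      then acc ++ [((pos1.1 + i, pos1.2), pos1), ((pos2.1 + i, pos2.2), pos2)] else acc) np
  else if pos1.2 == pos2.2 then
    ([-1, 1] : List Int).foldl (fun acc i =>
      if pvCell board pos1.1 (pos1.2 + i) == 0 && pvCell board pos2.1 (pos2.2 + i) == 0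
      then acc ++ [(pos1, (pos1.1, pos1.2 + i)), (pos2, (pos2.1, pos2.2 + i))] else acc) np
  else np

-- new_board construction (identical in Source A and Source B): (n+2)×(n+2) of 1s, interior overwritten
def buildNewBoard (board : List (List Int)) : List (List Int) :=
  let n := board.length
  let init := (List.range (n+2)).map (fun _ => List.replicate (n+2) (1 : Int))
  (List.range n).foldl (fun nb i =>
    (List.range n).foldl (fun nb j =>
      nb.set (i+1) ((nb.getD (i+1) []).set (j+1) ((board.getD i []).getD j 0))) nb) init

-- A's while loop over the deque of (position, time); fuel is a totality guard only
def bfsA (nb : List (List Int)) (goal : PvPos) :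
    Nat → List (PvSt × Int) → PySem.Set PvSt → Int
  | 0, _, _ => 0
  | _+1, [], _ => 0
  | f+1, (pos, time) :: rest, visited =>
      if pos.1 == goal || pos.2 == goal then time
      else
        let qv := (getNextPos pos nb).foldl
          (fun (qv : List (PvSt × Int) × PySem.Set PvSt) np =>
            if qv.2.contains np then qv else (qv.1 ++ [(np, time + 1)], qv.2.add np))
          (rest, visited)
        bfsA nb goal f qv.1 qv.2

def solution (board : List (List Int)) : Int :=
  let n := board.length
  let nb := buildNewBoard board
  let start : PvSt := ((1,1),(1,2))
  -- fuel 2*(2*n+4)^4+4 can never be exhausted: the robot has fewer than (2*n+4)^4 distinct states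
  bfsA nb ((n : Int), (n : Int)) (2*(2*n+4)^4+4) [(start, 0)] (PySem.Set.ofList [start])

-- ===== PORT B =====

-- B's inner expansion: add unvisited neighbours of pos to the next frontier
def expandB (nb : List (List Int)) (fv : List PvSt × PySem.Set PvSt) (pos : PvSt) :
    List PvSt × PySem.Set PvSt :=
  (getNextPos pos nb).foldl
    (fun fv np => if fv.2.contains np then fv else (fv.1 ++ [np], fv.2.add np)) fv

-- B's while loop over whole frontiers; time = current depth; fuel is a totality guard only
def bfsB (nb : List (List Int)) (goal : PvPos) :
    Nat → List PvSt → PySem.Set PvSt → Int → Int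
  | 0, _, _, _ => 0
  | _+1, [], _, _ => 0
  | f+1, p :: rest, visited, time =>
      if (p :: rest).any (fun pos => pos.1 == goal || pos.2 == goal) then time
      else
        let fv := (p :: rest).foldl (expandB nb) ([], visited)
        bfsB nb goal f fv.1 fv.2 (time + 1)

def solution_alt (board : List (List Int)) : Int :=
  let n := board.length
  let nb := buildNewBoard board
  let start : PvSt := ((1,1),(1,2))
  bfsB nb ((n : Int), (n : Int)) ((2*n+4)^4+4) [start] (PySem.Set.ofList [start]) 0

-- ===== PRECONDITION & SPEC =====

-- Pre_ excludes exactly the boards on which A raises IndexError: the empty board (the start state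
-- ((1,1),(1,2)) is expanded against the 2×2 padded board) and boards with a row shorter than len(board).
def Pre_solution (board : List (List Int)) : Prop :=
  1 ≤ board.length ∧ ∀ row ∈ board, board.length ≤ row.length
instance (board : List (List Int)) : Decidable (Pre_solution board) := by
  unfold Pre_solution; infer_instance

def pvWitness_solution : List (List Int) := [[0,0,0],[0,0,0],[0,0,0]]

def Spec_solution (board : List (List Int)) (out : Int) : Prop := out = solution_alt board
instance (board : List (List Int)) (out : Int) : Decidable (Spec_solution board out) := by
  unfold Spec_solution; infer_instance

-- ===== CLAIM (what is proved, stated in full; the proofs are below) =====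
def Claim_equal_solution : Prop := ∀ (board : List (List Int)), Dom_solution board →
  Pre_solution board → Spec_solution board (solution board)

-- ===== LEMMAS AND PROOFS =====

-- proof-only helpers: coordinate range and the finite state space
def pvInR (L : Nat) (c : Int) : Prop := -(L : Int) ≤ c ∧ c < (L : Int)
def pvInSt (L : Nat) (s : PvSt) : Prop :=
  pvInR L s.1.1 ∧ pvInR L s.1.2 ∧ pvInR L s.2.1 ∧ pvInR L s.2.2
def pvR (L : Nat) : List Int := (List.range (2*L)).map (fun k : Nat => (k : Int) - (L : Int))
def pvAll (L : Nat) : List PvSt := (pvR L ×ˢ pvR L) ×ˢ (pvR L ×ˢ pvR L)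

theorem pv_length_pvAll (L : Nat) : (pvAll L).length = (2*L)^4 := by
  simp [pvAll, pvR, List.length_product]; ring

theorem pv_mem_pvR {L : Nat} {c : Int} : c ∈ pvR L ↔ pvInR L c := by
  constructor
  · intro h
    obtain ⟨k, hk, he⟩ := List.mem_map.1 h
    rw [List.mem_range] at hk
    subst he
    constructor <;> [omega; omega]
  · intro ⟨h1, h2⟩
    refine List.mem_map.2 ⟨(c + L).toNat, ?_, by omega⟩
    rw [List.mem_range]; omega

theorem pv_mem_pvAll {L : Nat} {s : PvSt} : s ∈ pvAll L ↔ pvInSt L s := by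
  obtain ⟨⟨a, b⟩, ⟨c, d⟩⟩ := s
  simp only [pvAll, List.mem_product, pv_mem_pvR, pvInSt]
  tauto

-- generic fold preservation / membership lemmas
theorem pv_foldl_preserve_mem {α β : Type} (P : β → Prop) (l : List α) (f : β → α → β)
    (init : β) (h0 : P init) (hstep : ∀ b x, x ∈ l → P b → P (f b x)) :
    P (l.foldl f init) := by
  induction l generalizing init with
  | nil => exact h0
  | cons x l ih =>
    exact ih (f init x) (hstep init x (by simp) h0)
      (fun b y hy => hstep b y (by simp [hy]))

theorem pv_mem_foldl_append_ifs {α β : Type} (l : List α) (p : α → Bool) (g : α → List β) :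
    ∀ (acc : List β) (y : β),
      y ∈ l.foldl (fun acc x => if p x then acc ++ g x else acc) acc →
      y ∈ acc ∨ ∃ x ∈ l, p x = true ∧ y ∈ g x := by
  induction l with
  | nil => intro acc y h; exact Or.inl h
  | cons x l ih =>
    intro acc y h
    simp only [List.foldl_cons] at h
    by_cases hp : p x = true
    · rw [if_pos hp] at h
      rcases ih _ y h with h' | ⟨z, hz, hpz, hyz⟩
      · rcases List.mem_append.1 h' with h'' | h''
        · exact Or.inl h''
        · exact Or.inr ⟨x, by simp, hp, h''⟩
      · exact Or.inr ⟨z, by simp [hz], hpz, hyz⟩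
    · rw [if_neg hp] at h
      rcases ih _ y h with h' | ⟨z, hz, hpz, hyz⟩
      · exact Or.inl h'
      · exact Or.inr ⟨z, by simp [hz], hpz, hyz⟩

-- shape of the padded board
theorem pv_buildNewBoard_shape (board : List (List Int)) :
    (buildNewBoard board).length = board.length + 2 ∧
    ∀ r ∈ buildNewBoard board, r.length = board.length + 2 := by
  unfold buildNewBoard
  simp only []
  apply pv_foldl_preserve_mem
    (P := fun nb : List (List Int) => nb.length = board.length + 2 ∧ ∀ r ∈ nb, r.length = board.length + 2)
  · constructor
    · simp
    · intro r hr
      obtain ⟨k, _, rfl⟩ := List.mem_map.1 hr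
      simp
  · intro nb i hi hP
    apply pv_foldl_preserve_mem
      (P := fun nb : List (List Int) => nb.length = board.length + 2 ∧ ∀ r ∈ nb, r.length = board.length + 2)
    · exact hP
    · intro nb2 j hj hP2
      obtain ⟨hl, hr⟩ := hP2
      have hi' : i < board.length := List.mem_range.1 hi
      have hlt : i + 1 < nb2.length := by omega
      constructor
      · simp [hl]
      · intro r hrm
        rcases List.mem_or_eq_of_mem_set hrm with h | h
        · exact hr _ h
        · subst h
          rw [List.length_set]
          have hgd : nb2.getD (i+1) [] = nb2[i+1] := List.getD_eq_getElem nb2 [] hlt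
          rw [hgd]
          exact hr _ (List.getElem_mem hlt)

-- a cell that reads 0 lies at an in-range index pair
theorem pv_cell_zero_range {nb : List (List Int)} {L : Nat} {x y : Int}
    (hlen : nb.length = L) (hrows : ∀ r ∈ nb, r.length = L)
    (h : pvCell nb x y = 0) : pvInR L x ∧ pvInR L y := by
  unfold pvCell at h
  cases hx : PySem.List.pyGet? nb x with
  | none => rw [hx] at h; simp [PySem.List.pyGet?] at h
  | some row =>
    rw [hx] at h
    have hxr : PySem.Raise.InRange nb.length x := by
      by_contra hc
      rw [← PySem.List.pyGet?_eq_none_iff (xs := nb)] at hc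
      rw [hc] at hx; cases hx
    have hrow : row ∈ nb := PySem.List.mem_of_pyGet?_eq_some _ hx
    have hrl : row.length = L := hrows _ hrow
    simp only [Option.getD_some] at h
    cases hy : PySem.List.pyGet? row y with
    | none => rw [hy] at h; simp at h
    | some c =>
      have hyr : PySem.Raise.InRange row.length y := by
        by_contra hc
        rw [← PySem.List.pyGet?_eq_none_iff (xs := row)] at hc
        rw [hc] at hy; cases hy
      unfold PySem.Raise.InRange at hxr hyr
      constructor <;> constructor <;> omega

-- neighbours of an in-range state are in range
theorem pv_getNextPos_closure {nb : List (List Int)} {L : Nat}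
    (hlen : nb.length = L) (hrows : ∀ r ∈ nb, r.length = L)
    {s : PvSt} (hs : pvInSt L s) :
    ∀ s' ∈ getNextPos s nb, pvInSt L s' := by
  intro s' hmem
  obtain ⟨⟨hs11, hs12⟩, ⟨hs21, hs22⟩, _⟩ :
      (pvInR L s.1.1 ∧ pvInR L s.1.2) ∧ (pvInR L s.2.1 ∧ pvInR L s.2.2) ∧ True :=
    ⟨⟨hs.1, hs.2.1⟩, ⟨hs.2.2.1, hs.2.2.2⟩, trivial⟩
  have hnp : ∀ y ∈ ([(-1,0),(1,0),(0,-1),(0,1)] : List PvPos).foldl (fun acc m =>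
      if pvCell nb (s.1.1 + m.1) (s.1.2 + m.2) == 0 &&
         pvCell nb (s.2.1 + m.1) (s.2.2 + m.2) == 0
      then acc ++ [((s.1.1 + m.1, s.1.2 + m.2), (s.2.1 + m.1, s.2.2 + m.2))] else acc) [],
      pvInSt L y := by
    intro y hy
    rcases pv_mem_foldl_append_ifs _ _ _ _ _ hy with h | ⟨m, _, hc, hyg⟩
    · cases h
    · rw [Bool.and_eq_true, beq_iff_eq, beq_iff_eq] at hc
      have h1 := pv_cell_zero_range hlen hrows hc.1
      have h2 := pv_cell_zero_range hlen hrows hc.2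
      have hyg' : y = ((s.1.1 + m.1, s.1.2 + m.2), (s.2.1 + m.1, s.2.2 + m.2)) := by
        simpa using hyg
      subst hyg'
      exact ⟨h1.1, h1.2, h2.1, h2.2⟩
  unfold getNextPos at hmem
  simp only [] at hmem
  split_ifs at hmem with h1 h2
  · rcases pv_mem_foldl_append_ifs _ _ _ _ _ hmem with h | ⟨i, _, hc, hyg⟩
    · exact hnp _ h
    · rw [Bool.and_eq_true, beq_iff_eq, beq_iff_eq] at hc
      have hc1 := pv_cell_zero_range hlen hrows hc.1
      have hc2 := pv_cell_zero_range hlen hrows hc.2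
      have : s' = ((s.1.1 + i, s.1.2), s.1) ∨ s' = ((s.2.1 + i, s.2.2), s.2) := by
        simpa using hyg
      rcases this with rfl | rfl
      · exact And.intro hc1.1 (And.intro hc1.2 (And.intro hs11 hs12))
      · exact And.intro hc2.1 (And.intro hc2.2 (And.intro hs21 hs22))
  · rcases pv_mem_foldl_append_ifs _ _ _ _ _ hmem with h | ⟨i, _, hc, hyg⟩
    · exact hnp _ h
    · rw [Bool.and_eq_true, beq_iff_eq, beq_iff_eq] at hc
      have hc1 := pv_cell_zero_range hlen hrows hc.1
      have hc2 := pv_cell_zero_range hlen hrows hc.2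
      have : s' = (s.1, (s.1.1, s.1.2 + i)) ∨ s' = (s.2, (s.2.1, s.2.2 + i)) := by
        simpa using hyg
      rcases this with rfl | rfl
      · exact And.intro hs11 (And.intro hs12 (And.intro hc1.1 hc1.2))
      · exact And.intro hs21 (And.intro hs22 (And.intro hc2.1 hc2.2))
  · exact hnp _ hmem

-- A's inner fold over a neighbour list is B's, with times attached
theorem pv_bridge (t : Int) (l : List PvSt) :
    ∀ (X : List (PvSt × Int)) (nf : List PvSt) (v : PySem.Set PvSt),
      l.foldl (fun (qv : List (PvSt × Int) × PySem.Set PvSt) np =>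
          if qv.2.contains np then qv else (qv.1 ++ [(np, t + 1)], qv.2.add np))
        (X ++ nf.map (fun s => (s, t + 1)), v)
      = (X ++ (l.foldl (fun (fv : List PvSt × PySem.Set PvSt) np =>
            if fv.2.contains np then fv else (fv.1 ++ [np], fv.2.add np)) (nf, v)).1.map
            (fun s => (s, t + 1)),
         (l.foldl (fun (fv : List PvSt × PySem.Set PvSt) np =>
            if fv.2.contains np then fv else (fv.1 ++ [np], fv.2.add np)) (nf, v)).2) := by
  induction l with
  | nil => intro X nf v; simp
  | cons np l ih =>
    intro X nf v
    simp only [List.foldl_cons]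
    by_cases hc : v.contains np = true
    · rw [if_pos hc, if_pos hc]
      exact ih X nf v
    · rw [if_neg hc, if_neg hc]
      have : (X ++ nf.map (fun s => (s, t + 1))) ++ [(np, t + 1)]
          = X ++ (nf ++ [np]).map (fun s => (s, t + 1)) := by
        rw [List.map_append, List.append_assoc]; rfl
      rw [this]
      exact ih X (nf ++ [np]) (v.add np)

-- bookkeeping facts about the inner expansion fold
theorem pv_expand_facts (l : List PvSt) :
    ∀ (nf : List PvSt) (v : PySem.Set PvSt), v.Nodup →
      ((l.foldl (fun (fv : List PvSt × PySem.Set PvSt) np =>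
          if fv.2.contains np then fv else (fv.1 ++ [np], fv.2.add np)) (nf, v)).2.Nodup ∧
       (l.foldl (fun (fv : List PvSt × PySem.Set PvSt) np =>
          if fv.2.contains np then fv else (fv.1 ++ [np], fv.2.add np)) (nf, v)).1.length + v.length
         = nf.length + (l.foldl (fun (fv : List PvSt × PySem.Set PvSt) np =>
          if fv.2.contains np then fv else (fv.1 ++ [np], fv.2.add np)) (nf, v)).2.length ∧
       (∀ x ∈ (l.foldl (fun (fv : List PvSt × PySem.Set PvSt) np =>
          if fv.2.contains np then fv else (fv.1 ++ [np], fv.2.add np)) (nf, v)).2,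
          x ∈ v ∨ x ∈ l) ∧
       (∀ x ∈ (l.foldl (fun (fv : List PvSt × PySem.Set PvSt) np =>
          if fv.2.contains np then fv else (fv.1 ++ [np], fv.2.add np)) (nf, v)).1,
          x ∈ nf ∨ x ∈ l)) := by
  induction l with
  | nil =>
    intro nf v hv
    refine ⟨hv, rfl, ?_, ?_⟩ <;> intro x hx <;> exact Or.inl hx
  | cons np l ih =>
    intro nf v hv
    simp only [List.foldl_cons]
    by_cases hc : v.contains np = true
    · rw [if_pos hc]
      obtain ⟨a, b, c, d⟩ := ih nf v hv
      refine ⟨a, b, ?_, ?_⟩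
      · intro x hx
        rcases c x hx with h | h
        · exact Or.inl h
        · exact Or.inr (by simp [h])
      · intro x hx
        rcases d x hx with h | h
        · exact Or.inl h
        · exact Or.inr (by simp [h])
    · rw [if_neg hc]
      have hnp : np ∉ v := by
        intro hmem
        exact hc ((PySem.Set.contains_iff v np).2 hmem)
      have hadd : v.add np = v ++ [np] := PySem.Set.add_of_not_mem hnp
      have hvn : (v.add np).Nodup := PySem.Set.nodup_add v np hv
      obtain ⟨a, b, c, d⟩ := ih (nf ++ [np]) (v.add np) hvn
      refine ⟨a, ?_, ?_, ?_⟩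
      · rw [hadd] at b ⊢
        simp only [List.length_append, List.length_cons, List.length_nil] at b ⊢
        omega
      · intro x hx
        rcases c x hx with h | h
        · rw [hadd] at h
          rcases List.mem_append.1 h with h' | h'
          · exact Or.inl h'
          · have : x = np := by simpa using h'
            exact Or.inr (by simp [this])
        · exact Or.inr (by simp [h])
      · intro x hx
        rcases d x hx with h | h
        · rcases List.mem_append.1 h with h' | h'
          · exact Or.inl h'
          · have : x = np := by simpa using h'
            exact Or.inr (by simp [this])
        · exact Or.inr (by simp [h])

-- bookkeeping facts about one level's expansion
theorem pv_levelFold_facts (nb : List (List Int)) (cur : List PvSt) :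
    ∀ (pend : List PvSt) (v : PySem.Set PvSt), v.Nodup →
      ((cur.foldl (expandB nb) (pend, v)).2.Nodup ∧
       (cur.foldl (expandB nb) (pend, v)).1.length + v.length
         = pend.length + (cur.foldl (expandB nb) (pend, v)).2.length ∧
       (∀ x ∈ (cur.foldl (expandB nb) (pend, v)).2,
          x ∈ v ∨ ∃ s ∈ cur, x ∈ getNextPos s nb) ∧
       (∀ x ∈ (cur.foldl (expandB nb) (pend, v)).1,
          x ∈ pend ∨ ∃ s ∈ cur, x ∈ getNextPos s nb)) := by
  induction cur with
  | nil =>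
    intro pend v hv
    refine ⟨hv, rfl, ?_, ?_⟩ <;> intro x hx <;> exact Or.inl hx
  | cons s cur ih =>
    intro pend v hv
    simp only [List.foldl_cons]
    obtain ⟨a1, b1, c1, d1⟩ := pv_expand_facts (getNextPos s nb) pend v hv
    have hE : expandB nb (pend, v) s
        = ((getNextPos s nb).foldl (fun (fv : List PvSt × PySem.Set PvSt) np =>
            if fv.2.contains np then fv else (fv.1 ++ [np], fv.2.add np)) (pend, v)) := rfl
    obtain ⟨a2, b2, c2, d2⟩ := ih (expandB nb (pend, v) s).1 (expandB nb (pend, v) s).2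
      (by rw [hE]; exact a1)
    rw [Prod.mk.eta] at a2 b2 c2 d2
    refine ⟨a2, ?_, ?_, ?_⟩
    · rw [hE] at b2 ⊢
      omega
    · intro x hx
      rcases c2 x hx with h | ⟨s', hs', hx'⟩
      · rw [hE] at h
        rcases c1 x h with h' | h'
        · exact Or.inl h'
        · exact Or.inr ⟨s, by simp, h'⟩
      · exact Or.inr ⟨s', by simp [hs'], hx'⟩
    · intro x hx
      rcases d2 x hx with h | ⟨s', hs', hx'⟩
      · rw [hE] at h
        rcases d1 x h with h' | h'
        · exact Or.inl h'
        · exact Or.inr ⟨s, by simp, h'⟩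
      · exact Or.inr ⟨s', by simp [hs'], hx'⟩

theorem pv_bfsA_nil (nb : List (List Int)) (goal : PvPos) (f : Nat) (v : PySem.Set PvSt) :
    bfsA nb goal f [] v = 0 := by cases f <;> rfl

theorem pv_bfsB_nil (nb : List (List Int)) (goal : PvPos) (f : Nat) (v : PySem.Set PvSt)
    (t : Int) : bfsB nb goal f [] v t = 0 := by cases f <;> rfl

-- A consumes one whole level of the queue
theorem pv_levelstep (nb : List (List Int)) (goal : PvPos) (t : Int) (cur : List PvSt) :
    ∀ (pend : List PvSt) (v : PySem.Set PvSt) (f : Nat), cur.length ≤ f →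
      bfsA nb goal f (cur.map (fun s => (s, t)) ++ pend.map (fun s => (s, t + 1))) v =
        if cur.any (fun pos => pos.1 == goal || pos.2 == goal) then t
        else bfsA nb goal (f - cur.length)
          ((cur.foldl (expandB nb) (pend, v)).1.map (fun s => (s, t + 1)))
          (cur.foldl (expandB nb) (pend, v)).2 := by
  induction cur with
  | nil =>
    intro pend v f _
    simp [List.foldl_nil]
  | cons s cur ih =>
    intro pend v f hf
    cases f with
    | zero => simp at hf
    | succ f =>
      have hcons : ((s :: cur).map (fun s => (s, t)) ++ pend.map (fun s => (s, t + 1)))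
          = (s, t) :: (cur.map (fun s => (s, t)) ++ pend.map (fun s => (s, t + 1))) := by
        simp
      rw [hcons]
      show (if s.1 == goal || s.2 == goal then t
        else bfsA nb goal f _ _) = _
      by_cases hg : (s.1 == goal || s.2 == goal) = true
      · rw [if_pos hg]
        have : (s :: cur).any (fun pos => pos.1 == goal || pos.2 == goal) = true := by
          simp only [List.any_cons, hg, Bool.true_or]
        rw [if_pos this]
      · rw [if_neg hg]
        have hbr := pv_bridge t (getNextPos s nb) (cur.map (fun s => (s, t))) pend v
        rw [hbr]
        have hlen' : cur.length ≤ f := by simpa using Nat.succ_le_succ_iff.mp (by simpa using hf)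
        have := ih ((getNextPos s nb).foldl (fun (fv : List PvSt × PySem.Set PvSt) np =>
            if fv.2.contains np then fv else (fv.1 ++ [np], fv.2.add np)) (pend, v)).1
          ((getNextPos s nb).foldl (fun (fv : List PvSt × PySem.Set PvSt) np =>
            if fv.2.contains np then fv else (fv.1 ++ [np], fv.2.add np)) (pend, v)).2 f hlen'
        rw [Prod.mk.eta] at this
        rw [this]
        have hE : ((getNextPos s nb).foldl (fun (fv : List PvSt × PySem.Set PvSt) np =>
            if fv.2.contains np then fv else (fv.1 ++ [np], fv.2.add np)) (pend, v))
          = expandB nb (pend, v) s := rfl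
        rw [hE]
        have hany : (s :: cur).any (fun pos => pos.1 == goal || pos.2 == goal)
            = cur.any (fun pos => pos.1 == goal || pos.2 == goal) := by
          simp only [List.any_cons, hg, Bool.false_or]
        rw [hany, List.foldl_cons]
        have hsub : f - cur.length = f + 1 - (s :: cur).length := by
          simp [List.length_cons]
        rw [hsub]

-- the simulation: queue BFS with per-node times = level BFS with a depth counter
theorem pv_main {nb : List (List Int)} {L : Nat} (goal : PvPos)
    (hlen : nb.length = L) (hrows : ∀ r ∈ nb, r.length = L) :
    ∀ (fB : Nat) (cur : List PvSt) (v : PySem.Set PvSt) (t : Int) (fA : Nat),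
      v.Nodup → (∀ x ∈ v, x ∈ pvAll L) → (∀ s ∈ cur, pvInSt L s) →
      cur.length + 2 * ((pvAll L).length + 1 - v.length) ≤ fA →
      1 + ((pvAll L).length + 1 - v.length) ≤ fB →
      bfsA nb goal fA (cur.map (fun s => (s, t))) v = bfsB nb goal fB cur v t := by
  intro fB
  induction fB with
  | zero => intro cur v t fA _ _ _ _ h5; omega
  | succ g ih =>
    intro cur v t fA h1 h2 h3 h4 h5
    cases cur with
    | nil => rw [List.map_nil, pv_bfsA_nil, pv_bfsB_nil]
    | cons s cur₂ =>
      have hstep := pv_levelstep nb goal t (s :: cur₂) [] v fA (by omega)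
      simp only [List.map_nil, List.append_nil] at hstep
      rw [hstep]
      show _ = if (s :: cur₂).any (fun pos => pos.1 == goal || pos.2 == goal) then t
        else bfsB nb goal g ((s :: cur₂).foldl (expandB nb) ([], v)).1
          ((s :: cur₂).foldl (expandB nb) ([], v)).2 (t + 1)
      by_cases hany : (s :: cur₂).any (fun pos => pos.1 == goal || pos.2 == goal) = true
      · rw [if_pos hany, if_pos hany]
      · rw [if_neg hany, if_neg hany]
        obtain ⟨hN, hLen, hM2, hM1⟩ := pv_levelFold_facts nb (s :: cur₂) [] v h1
        simp only [List.length_nil, Nat.zero_add] at hLen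
        have hsub2 : ∀ x ∈ ((s :: cur₂).foldl (expandB nb) ([], v)).2, x ∈ pvAll L := by
          intro x hx
          rcases hM2 x hx with h | ⟨s', hs', hx'⟩
          · exact h2 x h
          · exact pv_mem_pvAll.2 (pv_getNextPos_closure hlen hrows (h3 s' hs') x hx')
        have hst1 : ∀ x ∈ ((s :: cur₂).foldl (expandB nb) ([], v)).1, pvInSt L x := by
          intro x hx
          rcases hM1 x hx with h | ⟨s', hs', hx'⟩
          · cases h
          · exact pv_getNextPos_closure hlen hrows (h3 s' hs') x hx'
        have hcard : ((s :: cur₂).foldl (expandB nb) ([], v)).2.length ≤ (pvAll L).length :=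
          ((hN.subperm (fun x hx => hsub2 x hx)).length_le)
        have hcardv : v.length ≤ (pvAll L).length :=
          ((h1.subperm (fun x hx => h2 x hx)).length_le)
        cases hF : ((s :: cur₂).foldl (expandB nb) ([], v)).1 with
        | nil =>
          rw [List.map_nil, pv_bfsA_nil, pv_bfsB_nil]
        | cons y ys =>
          rw [← hF]
          apply ih
          · exact hN
          · exact hsub2
          · exact hst1
          · have : 1 ≤ ((s :: cur₂).foldl (expandB nb) ([], v)).1.length := by
              rw [hF]; simp
            omega
          · have : 1 ≤ ((s :: cur₂).foldl (expandB nb) ([], v)).1.length := by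
              rw [hF]; simp
            omega

-- ===== VERDICT (by name: the statement is the Claim_ definition above) =====
theorem solution_spec : Claim_equal_solution := by
  intro board _ hpre
  obtain ⟨hn, _⟩ := hpre
  unfold Spec_solution solution solution_alt
  simp only []
  have hshape := pv_buildNewBoard_shape board
  have hstart : pvInSt (board.length + 2) (((1,1),(1,2)) : PvSt) := by
    unfold pvInSt pvInR
    refine ⟨⟨?_, ?_⟩, ⟨?_, ?_⟩, ⟨?_, ?_⟩, ⟨?_, ?_⟩⟩ <;> · push_cast; omega
  have hA : (pvAll (board.length + 2)).length = (2 * board.length + 4)^4 := by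
    rw [pv_length_pvAll]
    ring_nf
  have hmain := pv_main (goal := ((board.length : Int), (board.length : Int)))
    hshape.1 hshape.2 ((2 * board.length + 4)^4 + 4)
    [(((1:Int),(1:Int)),((1:Int),(2:Int)))]
    (PySem.Set.ofList [(((1:Int),(1:Int)),((1:Int),(2:Int)))]) 0
    (2 * (2 * board.length + 4)^4 + 4)
    (PySem.Set.nodup_ofList _)
    (by
      intro x hx
      have hx' : x = (((1:Int),(1:Int)),((1:Int),(2:Int))) := by
        simpa using (PySem.Set.mem_ofList _ _).1 hx
      subst hx'
      exact pv_mem_pvAll.2 hstart)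
    (by
      intro s hs
      have hs' : s = (((1:Int),(1:Int)),((1:Int),(2:Int))) := by simpa using hs
      subst hs'
      exact hstart)
    (by
      have hof : (PySem.Set.ofList [(((1:Int),(1:Int)),((1:Int),(2:Int)))]).length = 1 := rfl
      rw [hof, hA]
      generalize (2 * board.length + 4)^4 = M
      simp only [List.length_cons, List.length_nil]
      omega)
    (by
      have hof : (PySem.Set.ofList [(((1:Int),(1:Int)),((1:Int),(2:Int)))]).length = 1 := rfl
      rw [hof, hA]
      generalize (2 * board.length + 4)^4 = M
      omega)
  simp only [List.map_cons, List.map_nil] at hmain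
  exact hmain
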